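-- pv_equiv track=rewrite | github.com/aquatack/AdventOfCode | Day09/day09.py | is_disk_compressed
-- ===== SOURCE A (Python) =====
-- def is_disk_compressed(disk):
--     file_found = False
--     for i, char in enumerate(reversed(disk)):
--         if char == ".":
--             if file_found:
--                 return False
--         else:
--             file_found = True
--
--     return True
-- ===== SOURCE B (Python) =====
-- def is_disk_compressed(disk):
--     for i, char in enumerate(disk):
--         if char == ".":
--             return all(c == "." for c in disk[i:])
--     return True
-- ===== Notes on version B (the rewrite author's own statement) =====
-- stated objective: simpler
-- what changed: Forward scan that locates the first dot and then verifies the whole suffix is dots, instead of A's latched reverse scan with a file_found flag.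
import Mathlib
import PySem

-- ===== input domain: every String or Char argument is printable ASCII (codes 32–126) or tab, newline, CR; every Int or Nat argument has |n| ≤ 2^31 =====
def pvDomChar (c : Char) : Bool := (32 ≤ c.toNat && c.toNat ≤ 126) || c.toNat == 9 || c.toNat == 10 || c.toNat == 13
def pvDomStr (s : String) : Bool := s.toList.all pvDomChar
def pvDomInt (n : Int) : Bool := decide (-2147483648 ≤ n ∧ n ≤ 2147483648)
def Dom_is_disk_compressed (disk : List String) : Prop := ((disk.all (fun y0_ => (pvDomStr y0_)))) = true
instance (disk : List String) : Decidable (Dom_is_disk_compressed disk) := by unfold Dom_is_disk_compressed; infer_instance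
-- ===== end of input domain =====

-- B replaces A's latched reverse scan by: find the first dot, then check the whole suffix is dots (simpler decomposition).

-- ===== PORT A =====
-- loop over reversed(disk) with the file_found flag; returning false early is the `false` branch
def goA : List String → Bool → Bool
  | [], _ => true
  | c :: rest, fileFound =>
    if c == "." then
      if fileFound then false else goA rest fileFound
    else
      goA rest true

def is_disk_compressed (disk : List String) : Bool := goA disk.reverse false

-- ===== PORT B =====
-- forward scan: at the first ".", check that the slice disk[i:] (= c :: rest) is all dots
def goB : List String → Bool
  | [] => true
  | c :: rest => if c == "." then (c :: rest).all (fun x => x == ".") else goB rest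

def is_disk_compressed_alt (disk : List String) : Bool := goB disk

-- ===== PRECONDITION & SPEC =====
def Spec_is_disk_compressed (disk : List String) (out : Bool) : Prop := out = is_disk_compressed_alt disk
instance (disk : List String) (out : Bool) : Decidable (Spec_is_disk_compressed disk out) := by unfold Spec_is_disk_compressed; infer_instance

-- ===== CLAIM (what is proved, stated in full; the proofs are below) =====
def Claim_equal_is_disk_compressed : Prop := ∀ (disk : List String), Dom_is_disk_compressed disk → Spec_is_disk_compressed disk (is_disk_compressed disk)

-- ===== LEMMAS AND PROOFS =====

theorem goA_true (m : List String) : goA m true = m.all (fun c => !(c == ".")) := by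
  induction m with
  | nil => rfl
  | cons c t ih =>
    by_cases h : c = "." <;> simp [goA, h, ih]

theorem goA_false (m : List String) :
    goA m false = (m.dropWhile (fun c => c == ".")).all (fun c => !(c == ".")) := by
  induction m with
  | nil => rfl
  | cons c t ih =>
    by_cases h : c = "." <;>
      simp [goA, h, ih, goA_true]

theorem goB_eq (m : List String) :
    goB m = (m.dropWhile (fun c => !(c == "."))).all (fun c => c == ".") := by
  induction m with
  | nil => rfl
  | cons c t ih =>
    by_cases h : c = "." <;> simp [goB, h, ih]

theorem key {α : Type} (q : α → Bool) (l : List α) :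
    (l.reverse.dropWhile q).all (fun c => !(q c))
      = (l.dropWhile (fun c => !(q c))).all q := by
  induction l with
  | nil => rfl
  | cons c t ih =>
    rw [List.reverse_cons, List.dropWhile_append]
    by_cases hd : t.reverse.dropWhile q = []
    · have hallt : ∀ x ∈ t, q x = true := fun x hx =>
        (List.dropWhile_eq_nil_iff.mp hd) x (List.mem_reverse.mpr hx)
      have hsub : ∀ x ∈ t.dropWhile (fun c => !(q c)), q x = true := fun x hx =>
        hallt x ((List.dropWhile_sublist (p := fun c => !(q c)) (l := t)).mem hx)
      cases hqc : q c
      · simp [hd, hqc, List.all_eq_true]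
        exact hsub
      · simp [hd, hqc, List.all_eq_true]
        exact hallt
    · have hne : (t.reverse.dropWhile q).isEmpty = false := by
        simpa [List.isEmpty_iff] using hd
      cases hqc : q c
      · simp [hne, hqc, ih]
      · have htall : t.all q = false := by
          by_contra hall
          exact hd (List.dropWhile_eq_nil_iff.mpr (fun x hx =>
            (List.all_eq_true.mp (Bool.of_not_eq_false hall)) x (List.mem_reverse.mp hx)))
        simp [hne, hqc, htall]

-- ===== VERDICT (by name: the statement is the Claim_ definition above) =====
theorem is_disk_compressed_spec : Claim_equal_is_disk_compressed := by
  intro disk _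
  unfold Spec_is_disk_compressed is_disk_compressed is_disk_compressed_alt
  rw [goA_false, goB_eq, key]
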